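-- pv_equiv track=rewrite | github.com/samador88/cs373-collatz | SphereCollatz.py | collatz_maxcl
-- ===== SOURCE A (Python) =====
-- lst = [0] * 1000000
--
-- def collatz_maxcl (i, j) :
--     """
--     i the beginning of the range, inclusive
--     j the end of the range, inclusive
--     return max cycle length of the range [i, j]
--     """
--     assert (i > 0 and i < 1000000)
--     assert (j > 0 and j < 1000000)
--     max = 0
--     while (i <= j):
--         n = collatz_cycle_length(i)
--         if (n > max):
--             max = n
--         i += 1
--     assert (max > 0)
--     return max
--
-- def collatz_cycle_length(i):
--     """
--     i is the current number to find the cycle length of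
--     if odd multiply by 3 and add 1
--     if even divide by two
--     continue until reached 1
--     """
--     assert (i > 0)
--     current = i
--     if (current < 1000000 and lst[current] != 0):
--         return lst[i]
--     c =1
--     while i > 1 :
--         if (i < 1000000 and lst[i] != 0):
--            k = c - 1 + lst[i]
--            lst[current] = k
--            return k
--         if (i % 2) == 0 :
--             i = (i // 2)
--         else :
--             i = (3 * i) + 1
--         c += 1
--     assert (c > 0)
--     lst[current] = c
--     return c
-- ===== SOURCE B (Python) =====
-- def collatz_maxcl(i, j):
--     """
--     i the beginning of the range, inclusive
--     j the end of the range, inclusive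
--     return max cycle length of the range [i, j]
--     """
--     assert (i > 0 and i < 1000000)
--     assert (j > 0 and j < 1000000)
--     cache = [0] * 1000000
--     best = 0
--     for n in range(i, j + 1):
--         best = max(best, _cycle_length(n, cache))
--     assert (best > 0)
--     return best
--
-- def _cycle_length(n, cache):
--     # pass 1: collect the trajectory until we reach 1 or a cached value
--     path = []
--     cur = n
--     while cur != 1 and (cur >= 1000000 or cache[cur] == 0):
--         path.append(cur)
--         cur = cur // 2 if cur % 2 == 0 else 3 * cur + 1
--     # pass 2: walk the trajectory backwards, assigning and caching lengths
--     seed = 1 if cur == 1 else cache[cur]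
--     for v in reversed(path):
--         seed += 1
--         if v < 1000000:
--             cache[v] = seed
--     return seed
-- ===== Notes on version B (the rewrite author's own statement) =====
-- stated objective: alternative
-- what changed: A computes each cycle length with one memoized forward while-loop that caches only the range's start values; B uses a two-pass decomposition per value - first collect the whole trajectory as an explicit list until reaching 1 or a cached value, then walk that list backwards assigning lengths and caching every visited value below 1000000 - so repeated work disappears through the densely filled cache.
import Mathlib
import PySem

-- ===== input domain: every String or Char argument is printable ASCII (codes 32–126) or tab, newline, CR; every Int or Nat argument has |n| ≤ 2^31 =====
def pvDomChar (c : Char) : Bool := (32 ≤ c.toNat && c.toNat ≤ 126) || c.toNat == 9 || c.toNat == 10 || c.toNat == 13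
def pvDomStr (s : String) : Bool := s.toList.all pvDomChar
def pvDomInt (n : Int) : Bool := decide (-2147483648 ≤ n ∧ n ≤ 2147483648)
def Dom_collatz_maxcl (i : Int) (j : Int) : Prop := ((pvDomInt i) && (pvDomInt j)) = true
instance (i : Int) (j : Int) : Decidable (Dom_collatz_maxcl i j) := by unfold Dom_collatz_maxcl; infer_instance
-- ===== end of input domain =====

-- B replaces A's single memoized while-loop by a two-pass trajectory method (collect the chain,
-- then assign lengths walking it backwards, caching every visited value < 1000000): an alternative
-- decomposition that fills the cache far more densely than A (which caches only range starts).

-- one Collatz step: n // 2 if n % 2 == 0 else 3*n + 1 (shared arithmetic helper of both ports)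
def cstep (n : Int) : Int := if PySem.Int.mod n 2 = 0 then PySem.Int.floordiv n 2 else 3 * n + 1

-- ===== PORT A =====
-- A's global list lst = [0]*1000000 is an Array Int of zeroes (a fresh table per call: the
-- equivalence is about a run started from the all-zero table).  Reads `lst[i]` are guarded by
-- `i < 1000000` in A and every index actually read or written is positive once the asserts have
-- passed (the Collatz step keeps positive values positive), so `.toNat` indexing is exact here.
-- The while-loop carries fuel 10^9; fuel exhaustion returns 0 and is unreachable on Pre_ (each
-- range value reaches 1 in far fewer steps).  A's asserts become the guard in collatz_maxcl:
-- where Python raises AssertionError the port returns 0 (those inputs are outside Pre_).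
def loopA : Nat → Int → Int → Int → Array Int → Int × Array Int
  | 0, _, _, _, lst => (0, lst)
  | f + 1, current, i, c, lst =>
    if i > 1 then
      if i < 1000000 ∧ lst.getD i.toNat 0 ≠ 0 then
        (c - 1 + lst.getD i.toNat 0, lst.setIfInBounds current.toNat (c - 1 + lst.getD i.toNat 0))
      else loopA f current (cstep i) (c + 1) lst
    else (c, lst.setIfInBounds current.toNat c)

def cclA (i : Int) (lst : Array Int) : Int × Array Int :=
  if i < 1000000 ∧ lst.getD i.toNat 0 ≠ 0 then (lst.getD i.toNat 0, lst)
  else loopA 1000000000 i i 1 lst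

def maxLoopA : Nat → Int → Int → Array Int → Int
  | 0, _, mx, _ => mx
  | cnt + 1, i, mx, lst =>
    let p := cclA i lst
    maxLoopA cnt (i + 1) (if p.1 > mx then p.1 else mx) p.2

def collatz_maxcl (i : Int) (j : Int) : Int :=
  if 0 < i ∧ i < 1000000 ∧ 0 < j ∧ j < 1000000 then
    maxLoopA (j + 1 - i).toNat i 0 (Array.replicate 1000000 0)
  else 0

-- ===== PORT B =====
-- B's cache = [0]*1000000 is the same Array Int model; `.toNat` indexing is exact for the same
-- reason as in port A (all values read or written are positive under the asserts).
-- pass 1: collect the trajectory until we reach 1 or a cached value (fuel as in A's port)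
def buildB : Nat → Int → Array Int → List Int × Int
  | 0, cur, _ => ([], cur)
  | f + 1, cur, cache =>
    if cur ≠ 1 ∧ (1000000 ≤ cur ∨ cache.getD cur.toNat 0 = 0) then
      let r := buildB f (cstep cur) cache
      (cur :: r.1, r.2)
    else ([], cur)

-- pass 2: walk the trajectory backwards, assigning and caching lengths
def walkB (path : List Int) (seed : Int) (cache : Array Int) : Int × Array Int :=
  path.reverse.foldl
    (fun st v => (st.1 + 1, if v < 1000000 then st.2.setIfInBounds v.toNat (st.1 + 1) else st.2))
    (seed, cache)

def cclB (n : Int) (cache : Array Int) : Int × Array Int :=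
  let r := buildB 1000000000 n cache
  walkB r.1 (if r.2 = 1 then 1 else cache.getD r.2.toNat 0) cache

-- B's asserts become the same guard as in port A: where Python raises AssertionError, return 0
def collatz_maxcl_alt (i : Int) (j : Int) : Int :=
  if 0 < i ∧ i < 1000000 ∧ 0 < j ∧ j < 1000000 then
    ((PySem.List.pyRange i (j + 1) 1).foldl
      (fun st n => let p := cclB n st.2; (max st.1 p.1, p.2)) (0, Array.replicate 1000000 0)).1
  else 0

-- ===== PRECONDITION & SPEC =====
-- The termination clause of Pre_ is checked value by value over the range: nstep is the Collatz
-- step on Nat, and prewalk walks a value until it reaches 1 or falls onto an ALREADY CHECKED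
-- value of the range (i ≤ x < v), within 999 steps; preOK c i v checks the c values v, v+1, ….
-- (Every 0 < k < 1000000 reaches 1 within 524 plain steps, so the check holds on the whole
-- asserted domain; the staged bound only makes Pre_ fast to decide.)
def nstep (n : Nat) : Nat := if n % 2 = 0 then n / 2 else 3 * n + 1

def prewalk : Nat → Nat → Nat → Nat → Bool
  | 0, _, _, _ => false
  | f + 1, i, v, x =>
    if x = 1 then true
    else if i ≤ x ∧ x < v then true
    else prewalk f i v (nstep x)

def preOK : Nat → Nat → Nat → Bool
  | 0, _, _ => true
  | c + 1, i, v => prewalk 999 i v v && preOK c i (v + 1)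

-- Pre_ excludes exactly the inputs where A raises or never returns: an AssertionError when
-- i ≤ 0, i ≥ 1000000, j ≤ 0, j ≥ 1000000 or i > j, and divergence should some value of the
-- range never reach 1 (the termination clause; it holds for the whole asserted domain).
def Pre_collatz_maxcl (i : Int) (j : Int) : Prop :=
  0 < i ∧ i < 1000000 ∧ 0 < j ∧ j < 1000000 ∧ i ≤ j ∧
    preOK (j + 1 - i).toNat i.toNat i.toNat = true
instance (i : Int) (j : Int) : Decidable (Pre_collatz_maxcl i j) := by
  unfold Pre_collatz_maxcl; infer_instance

def pvWitness_collatz_maxcl : Int × Int := (1, 3)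

def Spec_collatz_maxcl (i : Int) (j : Int) (out : Int) : Prop := out = collatz_maxcl_alt i j
instance (i : Int) (j : Int) (out : Int) : Decidable (Spec_collatz_maxcl i j out) := by
  unfold Spec_collatz_maxcl; infer_instance

-- ===== CLAIM (what is proved, stated in full; the proofs are below) =====
def Claim_equal_collatz_maxcl : Prop := ∀ (i : Int) (j : Int), Dom_collatz_maxcl i j →
  Pre_collatz_maxcl i j → Spec_collatz_maxcl i j (collatz_maxcl i j)

-- ===== LEMMAS AND PROOFS =====

-- the cycle length, computed by plain fueled iteration (reference value for both ports)
def plen : Nat → Int → Int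
  | 0, k => if 1 < k then 0 else 1
  | f + 1, k => if 1 < k then 1 + plen f (cstep k) else 1

def L (k : Int) : Int := plen 1000000000 k

-- invariant of both tables: every nonzero cell holds the true cycle length of a terminating number
def AInv (lst : Array Int) : Prop :=
  lst.size = 1000000 ∧
    ∀ v : Int, 0 < v → v < 1000000 → lst.getD v.toNat 0 ≠ 0 →
      (∃ m < 1000000000, cstep^[m] v = 1) ∧ lst.getD v.toNat 0 = L v

-- the pure maximum fold both outer loops reduce to
def mfold : Nat → Int → Int → Int
  | 0, _, mx => mx
  | cnt + 1, k, mx => mfold cnt (k + 1) (if L k > mx then L k else mx)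

-- ---- soundness of the Pre_ termination check ----

lemma nstep_cast (n : Nat) : cstep (n : Int) = ((nstep n : Nat) : Int) := by
  have hmod : PySem.Int.mod (n : Int) 2 = ((n % 2 : Nat) : Int) := by
    exact_mod_cast PySem.Int.mod_natCast n 2
  have hdiv : PySem.Int.floordiv (n : Int) 2 = ((n / 2 : Nat) : Int) := by
    exact_mod_cast PySem.Int.floordiv_natCast n 2
  unfold cstep nstep
  rcases Nat.even_or_odd n with he | ho
  · have h2 : n % 2 = 0 := Nat.even_iff.mp he
    rw [if_pos (by rw [hmod, h2]; norm_num), if_pos h2, hdiv]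
  · have h2 : n % 2 = 1 := Nat.odd_iff.mp ho
    rw [if_neg (by rw [hmod, h2]; norm_num), if_neg (by omega)]
    push_cast
    ring

lemma nstep_iter_cast : ∀ (m n : Nat), nstep^[m] n = 1 → cstep^[m] (n : Int) = 1 := by
  intro m
  induction m with
  | zero => intro n h; simp at h ⊢; omega
  | succ m ih =>
    intro n h
    rw [Function.iterate_succ_apply] at h ⊢
    rw [nstep_cast]
    exact ih (nstep n) h

lemma prewalk_sound : ∀ (f i v x : Nat), prewalk f i v x = true →
    ∃ m ≤ f, nstep^[m] x = 1 ∨ (i ≤ nstep^[m] x ∧ nstep^[m] x < v) := by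
  intro f
  induction f with
  | zero => intro i v x h; rw [prewalk] at h; exact absurd h (by simp)
  | succ f ih =>
    intro i v x h
    rw [prewalk] at h
    split_ifs at h with h1 h2
    · exact ⟨0, by omega, by simpa using Or.inl h1⟩
    · exact ⟨0, by omega, by simpa using Or.inr h2⟩
    · obtain ⟨m, hm, hh⟩ := ih i v (nstep x) h
      exact ⟨m + 1, by omega, by rwa [Function.iterate_succ_apply]⟩

lemma preOK_sound : ∀ (c i v : Nat), i ≤ v → preOK c i v = true →
    (∀ w, i ≤ w → w < v → ∃ m < 1000 * (w + 1 - i), nstep^[m] w = 1) →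
    ∀ w, i ≤ w → w < v + c → ∃ m < 1000 * (w + 1 - i), nstep^[m] w = 1 := by
  intro c
  induction c with
  | zero => intro i v _ _ hknow w hw1 hw2; exact hknow w hw1 (by omega)
  | succ c ih =>
    intro i v hiv h hknow
    rw [preOK, Bool.and_eq_true] at h
    have hv : ∃ m < 1000 * (v + 1 - i), nstep^[m] v = 1 := by
      obtain ⟨m, hm, hh⟩ := prewalk_sound 999 i v v h.1
      rcases hh with h1 | ⟨hl, hr⟩
      · exact ⟨m, by omega, h1⟩
      · obtain ⟨m', hm', h1'⟩ := hknow (nstep^[m] v) hl hr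
        refine ⟨m + m', by omega, ?_⟩
        rw [Nat.add_comm, Function.iterate_add_apply]
        exact h1'
    have hknow' : ∀ w, i ≤ w → w < v + 1 → ∃ m < 1000 * (w + 1 - i), nstep^[m] w = 1 := by
      intro w hw1 hw2
      by_cases hwv : w < v
      · exact hknow w hw1 hwv
      · obtain rfl : w = v := by omega
        exact hv
    have := ih i (v + 1) (by omega) h.2 hknow'
    intro w hw1 hw2
    exact this w hw1 (by omega)

-- ---- basic facts about cstep, plen and L ----

lemma arr_getD_set (a : Array Int) (n m : Nat) (x : Int) (h : n < a.size) :
    (a.setIfInBounds n x).getD m 0 = if m = n then x else a.getD m 0 := by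
  rw [Array.getD_eq_getD_getElem?, Array.getD_eq_getD_getElem?, Array.getElem?_setIfInBounds]
  by_cases e : n = m
  · subst e; simp [h]
  · rw [if_neg e, if_neg (fun h' : m = n => e h'.symm)]

lemma arr_getD_replicate (n : Nat) : (Array.replicate 1000000 (0 : Int)).getD n 0 = 0 := by
  rw [Array.getD_eq_getD_getElem?]
  by_cases h : n < 1000000
  · simp [h]
  · simp [h]

lemma cstep_nonpos {n : Int} (h : n ≤ 0) : cstep n ≤ 0 := by
  unfold cstep
  rw [PySem.Int.mod_eq_emod_of_pos (b := 2) (by norm_num), PySem.Int.floordiv_eq_ediv_of_pos (b := 2) (by norm_num)]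
  split_ifs <;> omega

lemma iter_pos {m : Nat} {n : Int} (h : cstep^[m] n = 1) : 0 < n := by
  induction m generalizing n with
  | zero => simp at h; omega
  | succ m ih =>
    rw [Function.iterate_succ_apply] at h
    by_contra hn
    have h1 := cstep_nonpos (n := n) (by omega)
    have h2 := ih h
    omega

lemma plen_stable : ∀ (m f f' : Nat) (k : Int), m < f → m < f' → cstep^[m] k = 1 →
    plen f k = plen f' k := by
  intro m
  induction m with
  | zero =>
    intro f f' k hf hf' h
    simp at h
    obtain ⟨a, rfl⟩ : ∃ a, f = a + 1 := ⟨f - 1, by omega⟩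
    obtain ⟨b, rfl⟩ : ∃ b, f' = b + 1 := ⟨f' - 1, by omega⟩
    simp [plen, h]
  | succ m ih =>
    intro f f' k hf hf' h
    obtain ⟨a, rfl⟩ : ∃ a, f = a + 1 := ⟨f - 1, by omega⟩
    obtain ⟨b, rfl⟩ : ∃ b, f' = b + 1 := ⟨f' - 1, by omega⟩
    by_cases hk : 1 < k
    · rw [Function.iterate_succ_apply] at h
      simp only [plen, hk, if_true]
      rw [ih a b (cstep k) (by omega) (by omega) h]
    · simp [plen, hk]

lemma L_one {k : Int} (h : ¬ 1 < k) : L k = 1 := by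
  unfold L
  rw [show (1000000000 : Nat) = 999999999 + 1 from rfl, plen]
  simp [h]

lemma L_succ {m : Nat} {k : Int} (h1 : 1 < k) (hm : m < 1000000000) (hit : cstep^[m] k = 1) :
    L k = 1 + L (cstep k) ∧ ∃ m' < 1000000000, cstep^[m'] (cstep k) = 1 ∧ m' + 1 = m := by
  obtain ⟨m', rfl⟩ : ∃ m', m = m' + 1 := by
    rcases m with _ | m'
    · simp at hit; omega
    · exact ⟨m', rfl⟩
  rw [Function.iterate_succ_apply] at hit
  refine ⟨?_, m', by omega, hit, rfl⟩
  unfold L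
  rw [show (1000000000 : Nat) = 999999999 + 1 from rfl, plen]
  simp only [h1, if_true]
  rw [plen_stable m' 999999999 1000000000 (cstep k) (by omega) (by omega) hit]

lemma AInv_set {lst : Array Int} (hA : AInv lst) {v : Int} {m : Nat}
    (hv0 : 0 < v) (hv1 : v < 1000000) (hm : m < 1000000000) (hit : cstep^[m] v = 1) :
    AInv (lst.setIfInBounds v.toNat (L v)) := by
  obtain ⟨hsz, hd⟩ := hA
  constructor
  · rw [Array.size_setIfInBounds, hsz]
  · intro v' h0 h1 hne
    have hb : v.toNat < lst.size := by rw [hsz]; omega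
    rw [arr_getD_set lst v.toNat v'.toNat (L v) hb] at hne ⊢
    by_cases e : v'.toNat = v.toNat
    · obtain rfl : v' = v := by omega
      rw [if_pos rfl] at hne ⊢
      exact ⟨⟨m, hm, hit⟩, rfl⟩
    · rw [if_neg e] at hne ⊢
      exact hd v' h0 h1 hne

-- ---- port A computes L over the range ----

lemma loopA_spec : ∀ (m f : Nat) (k current c : Int) (lst : Array Int),
    m < 1000000000 → cstep^[m] k = 1 → m < f → AInv lst →
    loopA f current k c lst = (c - 1 + L k, lst.setIfInBounds current.toNat (c - 1 + L k)) := by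
  intro m
  induction m with
  | zero =>
    intro f k current c lst _ hit hf hI
    simp at hit
    obtain ⟨a, rfl⟩ : ∃ a, f = a + 1 := ⟨f - 1, by omega⟩
    subst hit
    rw [loopA]
    simp only [show ¬ ((1 : Int) > 1) by omega, if_false]
    rw [L_one (by omega)]
    norm_num
  | succ m ih =>
    intro f k current c lst hm hit hf hI
    obtain ⟨a, rfl⟩ : ∃ a, f = a + 1 := ⟨f - 1, by omega⟩
    rw [loopA]
    by_cases hk : k > 1
    · simp only [hk, if_true]
      by_cases hhit : k < 1000000 ∧ lst.getD k.toNat 0 ≠ 0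
      · rw [if_pos hhit, (hI.2 k (by omega) hhit.1 hhit.2).2]
      · rw [if_neg hhit]
        obtain ⟨hLk, m', hm', hit', hm'1⟩ := L_succ hk hm hit
        obtain rfl : m' = m := by omega
        rw [ih a (cstep k) current (c + 1) lst hm' hit' (by omega) hI, hLk]
        have e : c - 1 + (1 + L (cstep k)) = c + 1 - 1 + L (cstep k) := by ring
        rw [e]
    · simp only [hk, if_false]
      rw [L_one (by omega)]
      norm_num

lemma cclA_spec {k : Int} {m : Nat} (hk0 : 0 < k) (hk1 : k < 1000000)
    (hm : m < 1000000000) (hit : cstep^[m] k = 1) {lst : Array Int} (hI : AInv lst) :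
    (cclA k lst).1 = L k ∧ AInv (cclA k lst).2 := by
  unfold cclA
  by_cases hhit : k < 1000000 ∧ lst.getD k.toNat 0 ≠ 0
  · rw [if_pos hhit]
    exact ⟨(hI.2 k hk0 hk1 hhit.2).2, hI⟩
  · rw [if_neg hhit]
    rw [loopA_spec m 1000000000 k k 1 lst hm hit (by omega) hI]
    have e : (1 : Int) - 1 + L k = L k := by ring
    rw [e]
    exact ⟨rfl, AInv_set hI hk0 hk1 hm hit⟩

lemma maxLoopA_spec : ∀ (cnt : Nat) (k mx : Int) (lst : Array Int),
    (∀ t < cnt, 0 < k + t ∧ k + t < 1000000 ∧ ∃ m < 1000000000, cstep^[m] (k + t) = 1) →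
    AInv lst → maxLoopA cnt k mx lst = mfold cnt k mx := by
  intro cnt
  induction cnt with
  | zero => intro k mx lst _ _; rfl
  | succ cnt ih =>
    intro k mx lst hterm hI
    obtain ⟨hk0, hk1, m, hm, hit⟩ := hterm 0 (by omega)
    rw [show k + ((0 : Nat) : Int) = k by push_cast; ring] at hk0 hk1 hit
    obtain ⟨h1, h2⟩ := cclA_spec hk0 hk1 hm hit hI
    simp only [maxLoopA, mfold]
    rw [h1]
    apply ih
    · intro t ht
      obtain ⟨h0', h1', m', hm', hit'⟩ := hterm (t + 1) (by omega)
      rw [show k + ((t + 1 : Nat) : Int) = k + 1 + (t : Int) by push_cast; ring] at h0' h1' hit'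
      exact ⟨h0', h1', m', hm', hit'⟩
    · exact h2

-- ---- port B computes L over the range ----

-- chain predicate produced by buildB: path follows cstep from cur to a stop (1 or a cache hit)
def ChainP (cache : Array Int) : Int → List Int → Int → Prop
  | cur, [], stop => stop = cur ∧ ¬ (cur ≠ 1 ∧ (1000000 ≤ cur ∨ cache.getD cur.toNat 0 = 0))
  | cur, v :: p, stop => v = cur ∧ cur ≠ 1 ∧ (1000000 ≤ cur ∨ cache.getD cur.toNat 0 = 0) ∧
      ChainP cache (cstep cur) p stop

lemma buildB_spec : ∀ (m f : Nat) (cur : Int) (cache : Array Int),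
    cstep^[m] cur = 1 → m < f →
    ChainP cache cur (buildB f cur cache).1 (buildB f cur cache).2 := by
  intro m
  induction m with
  | zero =>
    intro f cur cache hit hf
    simp at hit
    obtain ⟨a, rfl⟩ : ∃ a, f = a + 1 := ⟨f - 1, by omega⟩
    subst hit
    rw [buildB]
    simp only [show ¬ ((1 : Int) ≠ 1 ∧ ((1000000 : Int) ≤ 1 ∨ cache.getD (1 : Int).toNat 0 = 0))
      by simp, if_false]
    exact ⟨rfl, by simp⟩
  | succ m ih =>
    intro f cur cache hit hf
    obtain ⟨a, rfl⟩ : ∃ a, f = a + 1 := ⟨f - 1, by omega⟩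
    rw [buildB]
    by_cases hc : cur ≠ 1 ∧ ((1000000 : Int) ≤ cur ∨ cache.getD cur.toNat 0 = 0)
    · rw [if_pos hc]
      rw [Function.iterate_succ_apply] at hit
      exact ⟨rfl, hc.1, hc.2, ih a (cstep cur) cache hit (by omega)⟩
    · rw [if_neg hc]
      exact ⟨rfl, hc⟩

-- the stop of a chain is 1 or a cached value, and it terminates whenever the start does
lemma chainP_stop : ∀ (path : List Int) (cache : Array Int) (cur stop : Int) (m : Nat),
    ChainP cache cur path stop → cstep^[m] cur = 1 →
    ¬ (stop ≠ 1 ∧ (1000000 ≤ stop ∨ cache.getD stop.toNat 0 = 0)) ∧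
      ∃ m' ≤ m, cstep^[m'] stop = 1 := by
  intro path
  induction path with
  | nil =>
    intro cache cur stop m h hit
    obtain ⟨rfl, h2⟩ := h
    exact ⟨h2, m, le_refl m, hit⟩
  | cons v p ih =>
    intro cache cur stop m h hit
    obtain ⟨rfl, hne, -, hch'⟩ := h
    obtain ⟨m', rfl⟩ : ∃ m', m = m' + 1 := by
      rcases m with _ | m'
      · simp at hit; omega
      · exact ⟨m', rfl⟩
    rw [Function.iterate_succ_apply] at hit
    obtain ⟨ha, mm, hmm, hb⟩ := ih cache (cstep v) stop m' hch' hit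
    exact ⟨ha, mm, by omega, hb⟩

lemma walkB_spec : ∀ (path : List Int) (cur : Int) (m : Nat) (stop : Int)
    (cache : Array Int), AInv cache → ChainP cache cur path stop →
    cstep^[m] cur = 1 → m < 1000000000 →
    (walkB path (L stop) cache).1 = L cur ∧ AInv (walkB path (L stop) cache).2 := by
  intro path
  induction path with
  | nil =>
    intro cur m stop cache hI hch hit hm
    obtain ⟨rfl, -⟩ := hch
    exact ⟨rfl, hI⟩
  | cons v p ih =>
    intro cur m stop cache hI hch hit hm
    obtain ⟨rfl, hne, -, hch'⟩ := hch
    have hpos : 1 < v := by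
      have := iter_pos hit
      omega
    obtain ⟨hLv, m', hm', hit', hm'1⟩ := L_succ hpos hm hit
    have hw : walkB (v :: p) (L stop) cache =
        (fun st (x : Int) => ((st.1 + 1 : Int),
          if x < 1000000 then st.2.setIfInBounds x.toNat (st.1 + 1) else st.2))
          (walkB p (L stop) cache) v := by
      unfold walkB
      rw [List.reverse_cons, List.foldl_append]
      rfl
    obtain ⟨h1, h2⟩ := ih (cstep v) m' stop cache hI hch' hit' (by omega)
    rw [hw]
    simp only [h1]
    constructor
    · omega
    · split_ifs with hlt
      · rw [show L (cstep v) + 1 = L v by omega]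
        exact AInv_set h2 (by omega) hlt hm hit
      · exact h2

lemma cclB_spec {k : Int} {m : Nat} (hm : m < 1000000000) (hit : cstep^[m] k = 1)
    {cache : Array Int} (hI : AInv cache) :
    (cclB k cache).1 = L k ∧ AInv (cclB k cache).2 := by
  unfold cclB
  show (walkB (buildB 1000000000 k cache).1
      (if (buildB 1000000000 k cache).2 = 1 then (1 : Int)
        else cache.getD (buildB 1000000000 k cache).2.toNat 0) cache).1 = L k ∧
    AInv (walkB (buildB 1000000000 k cache).1
      (if (buildB 1000000000 k cache).2 = 1 then (1 : Int)
        else cache.getD (buildB 1000000000 k cache).2.toNat 0) cache).2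
  have hch := buildB_spec m 1000000000 k cache hit (by omega)
  obtain ⟨hstop, ms, hms, hits⟩ := chainP_stop _ cache k _ m hch hit
  have hseed : (if (buildB 1000000000 k cache).2 = 1 then (1 : Int)
      else cache.getD (buildB 1000000000 k cache).2.toNat 0) = L (buildB 1000000000 k cache).2 := by
    split_ifs with h1
    · rw [h1, L_one (by omega)]
    · have hb : ¬ ((1000000 : Int) ≤ (buildB 1000000000 k cache).2 ∨
          cache.getD (buildB 1000000000 k cache).2.toNat 0 = 0) := fun hc => hstop ⟨h1, hc⟩
      rw [not_or] at hb
      have hlt : (buildB 1000000000 k cache).2 < 1000000 := by omega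
      exact (hI.2 _ (iter_pos hits) hlt hb.2).2
  rw [hseed]
  exact walkB_spec _ k m _ cache hI hch hit hm

lemma foldB_spec : ∀ (cnt : Nat) (k mx : Int) (cache : Array Int),
    (∀ t < cnt, ∃ m < 1000000000, cstep^[m] (k + t) = 1) → AInv cache →
    ((PySem.List.pyRange k (k + cnt) 1).foldl
      (fun st n => let p := cclB n st.2; (max st.1 p.1, p.2)) (mx, cache)).1 = mfold cnt k mx := by
  intro cnt
  induction cnt with
  | zero =>
    intro k mx cache _ _
    rw [show k + ((0 : Nat) : Int) = k by push_cast; ring]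
    rw [PySem.List.pyRange_one, show (k - k).toNat = 0 by omega]
    rfl
  | succ cnt ih =>
    intro k mx cache hterm hI
    obtain ⟨m, hm, hit⟩ := hterm 0 (by omega)
    rw [show k + ((0 : Nat) : Int) = k by push_cast; ring] at hit
    obtain ⟨h1, h2⟩ := cclB_spec hm hit hI
    rw [PySem.List.pyRange_one_cons (by push_cast; omega)]
    rw [List.foldl_cons]
    simp only [h1]
    rw [mfold]
    have e1 : k + ((cnt + 1 : Nat) : Int) = (k + 1) + ((cnt : Nat) : Int) := by push_cast; ring
    rw [e1]
    have e2 : max mx (L k) = if L k > mx then L k else mx := by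
      split_ifs <;> omega
    rw [← e2]
    apply ih
    · intro t ht
      obtain ⟨m', hm', hit'⟩ := hterm (t + 1) (by omega)
      rw [show k + ((t + 1 : Nat) : Int) = k + 1 + (t : Int) by push_cast; ring] at hit'
      exact ⟨m', hm', hit'⟩
    · exact h2

-- ===== VERDICT (by name: the statement is the Claim_ definition above) =====
theorem collatz_maxcl_spec : Claim_equal_collatz_maxcl := by
  intro i j _ hpre
  obtain ⟨hi0, hi1, hj0, hj1, hij, hterm0⟩ := hpre
  have hterm : ∀ t < (j + 1 - i).toNat, ∃ m < 1000000000, cstep^[m] (i + t) = 1 := by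
    intro t ht
    have hN := preOK_sound ((j + 1 - i).toNat) i.toNat i.toNat (le_refl _) hterm0
      (fun w hw1 hw2 => absurd hw2 (by omega)) (i.toNat + t) (by omega) (by omega)
    obtain ⟨m, hm, hit⟩ := hN
    refine ⟨m, by omega, ?_⟩
    have := nstep_iter_cast m (i.toNat + t) hit
    rwa [show ((i.toNat + t : Nat) : Int) = i + t by omega] at this
  have htermA : ∀ t < (j + 1 - i).toNat,
      0 < i + t ∧ i + t < 1000000 ∧ ∃ m < 1000000000, cstep^[m] (i + t) = 1 := by
    intro t ht
    exact ⟨by omega, by omega, hterm t ht⟩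
  unfold Spec_collatz_maxcl collatz_maxcl collatz_maxcl_alt
  rw [if_pos ⟨hi0, hi1, hj0, hj1⟩, if_pos ⟨hi0, hi1, hj0, hj1⟩]
  have hA : AInv (Array.replicate 1000000 0) := by
    refine ⟨by simp, ?_⟩
    intro v _ _ hne
    exact absurd (arr_getD_replicate v.toNat) hne
  rw [maxLoopA_spec _ i 0 _ htermA hA]
  rw [show j + 1 = i + (((j + 1 - i).toNat : Nat) : Int) by omega]
  rw [foldB_spec _ i 0 _ hterm hA]
  congr 1
  omega
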